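-- pv_equiv track=rewrite | github.com/RPChinhara/cold-start-recommender | afsvd.py | item_attribute_generation_matrix
-- ===== SOURCE A (Python) =====
-- def item_attribute_generation_matrix(i_old, i_new, item_attributes: dict, A_set: tuple):
--     '''
--     i_old is a set containing Old Items\n
--     i_new is a set containg New Items\n
--     item_attributes is a dictionary containg Attributes\n
--     key: item_id, value: attribute
--     '''
--
--     IA_matrix_old = dict()
--     IA_matrix_new = dict()
--
--     # Create attribute vectors for old items
--     for item_id in i_old:
--         attributes = item_attributes.get(item_id, [])
--         attribute_vector = tuple(1 if attr in attributes else 0 for attr in A_set)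
--         IA_matrix_old[item_id] = attribute_vector
--
--     # Create attribute vectors for new items
--     for item_id in i_new:
--         attributes = item_attributes.get(item_id, [])
--         attribute_vector = tuple(1 if attr in attributes else 0 for attr in A_set)
--         IA_matrix_new[item_id] = attribute_vector
--
--     IA_matrix = {
--         "old_items": IA_matrix_old,
--         "new_items": IA_matrix_new
--     }
--
--     return IA_matrix
-- ===== SOURCE B (Python) =====
-- def item_attribute_generation_matrix(i_old, i_new, item_attributes: dict, A_set: tuple):
--     # Build, once, an index from each attribute in A_set to all its positions,
--     # then fill per-item zero vectors through that index instead of scanning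
--     # A_set per item.
--     n = len(A_set)
--     index = {}
--     for j, attr in enumerate(A_set):
--         index.setdefault(attr, []).append(j)
--
--     def vector_for(item_id):
--         row = [0] * n
--         for attr in item_attributes.get(item_id, []):
--             for j in index.get(attr, []):
--                 row[j] = 1
--         return tuple(row)
--
--     return {
--         "old_items": {item_id: vector_for(item_id) for item_id in i_old},
--         "new_items": {item_id: vector_for(item_id) for item_id in i_new},
--     }
-- ===== Notes on version B (the rewrite author's own statement) =====
-- stated objective: alternative
-- what changed: B inverts the traversal: instead of scanning all of A_set per item with a membership test, it precomputes one attribute->positions index over A_set and fills a mutable zero vector per item by walking the item's own attribute list through that index.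
import Mathlib
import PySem

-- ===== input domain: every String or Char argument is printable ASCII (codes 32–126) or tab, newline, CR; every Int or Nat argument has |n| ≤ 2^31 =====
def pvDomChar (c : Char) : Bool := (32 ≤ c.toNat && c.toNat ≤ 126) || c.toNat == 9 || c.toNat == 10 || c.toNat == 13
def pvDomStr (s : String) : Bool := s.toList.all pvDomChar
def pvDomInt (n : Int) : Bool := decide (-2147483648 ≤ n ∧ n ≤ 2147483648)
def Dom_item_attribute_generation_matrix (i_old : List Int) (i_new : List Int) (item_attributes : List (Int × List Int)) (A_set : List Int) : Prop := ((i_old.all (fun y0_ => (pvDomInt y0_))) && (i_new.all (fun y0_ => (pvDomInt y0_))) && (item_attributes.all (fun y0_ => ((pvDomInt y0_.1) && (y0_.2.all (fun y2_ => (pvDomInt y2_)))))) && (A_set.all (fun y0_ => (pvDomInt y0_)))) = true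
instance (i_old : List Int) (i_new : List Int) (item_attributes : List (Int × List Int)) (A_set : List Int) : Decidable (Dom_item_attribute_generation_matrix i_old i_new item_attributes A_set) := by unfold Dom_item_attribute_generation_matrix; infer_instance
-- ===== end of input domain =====

-- B replaces the per-item scan of A_set (membership test per column) by a precomputed
-- attribute -> positions index over A_set and fills per-item zero vectors through it
-- (alternative traversal, same results).

-- ===== PORT A =====
def item_attribute_generation_matrix (i_old : List Int) (i_new : List Int) (item_attributes : List (Int × List Int)) (A_set : List Int) : List (String × List (Int × List Int)) :=
  let ia := PySem.Dict.ofList item_attributes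
  let IA_matrix_old := i_old.foldl (fun d item_id =>
      let attributes := ia.getD item_id []
      d.insert item_id (A_set.map (fun attr => if attributes.contains attr then (1 : Int) else 0)))
    PySem.Dict.empty
  let IA_matrix_new := i_new.foldl (fun d item_id =>
      let attributes := ia.getD item_id []
      d.insert item_id (A_set.map (fun attr => if attributes.contains attr then (1 : Int) else 0)))
    PySem.Dict.empty
  [("old_items", IA_matrix_old.items), ("new_items", IA_matrix_new.items)]

-- ===== PORT B =====
-- index: for j, attr in enumerate(A_set): index.setdefault(attr, []).append(j)
def pvIndex (A_set : List Int) : PySem.Dict Int (List Int) :=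
  (PySem.List.enumerate A_set 0).foldl (fun d p => d.modify p.2 [] (· ++ [p.1])) PySem.Dict.empty

-- row = [0]*n; for attr in item_attributes.get(item_id, []): for j in index.get(attr, []): row[j] = 1
def pvVectorFor (ia : PySem.Dict Int (List Int)) (idx : PySem.Dict Int (List Int)) (n : Nat) (item_id : Int) : List Int :=
  (ia.getD item_id []).foldl (fun row attr =>
    (idx.getD attr []).foldl (fun row j => PySem.List.pySetD row j 1) row) (List.replicate n (0 : Int))

def item_attribute_generation_matrix_alt (i_old : List Int) (i_new : List Int) (item_attributes : List (Int × List Int)) (A_set : List Int) : List (String × List (Int × List Int)) :=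
  let ia := PySem.Dict.ofList item_attributes
  let idx := pvIndex A_set
  [("old_items", (i_old.foldl (fun d item_id => d.insert item_id (pvVectorFor ia idx A_set.length item_id)) PySem.Dict.empty).items),
   ("new_items", (i_new.foldl (fun d item_id => d.insert item_id (pvVectorFor ia idx A_set.length item_id)) PySem.Dict.empty).items)]

-- ===== PRECONDITION & SPEC =====
def Spec_item_attribute_generation_matrix (i_old : List Int) (i_new : List Int) (item_attributes : List (Int × List Int)) (A_set : List Int) (out : List (String × List (Int × List Int))) : Prop := out = item_attribute_generation_matrix_alt i_old i_new item_attributes A_set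
instance (i_old : List Int) (i_new : List Int) (item_attributes : List (Int × List Int)) (A_set : List Int) (out : List (String × List (Int × List Int))) : Decidable (Spec_item_attribute_generation_matrix i_old i_new item_attributes A_set out) := by unfold Spec_item_attribute_generation_matrix; infer_instance

-- ===== CLAIM (what is proved, stated in full; the proofs are below) =====
def Claim_equal_item_attribute_generation_matrix : Prop := ∀ (i_old : List Int) (i_new : List Int) (item_attributes : List (Int × List Int)) (A_set : List Int), Dom_item_attribute_generation_matrix i_old i_new item_attributes A_set → Spec_item_attribute_generation_matrix i_old i_new item_attributes A_set (item_attribute_generation_matrix i_old i_new item_attributes A_set)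

-- ===== LEMMAS AND PROOFS =====

-- the index lookup returns exactly the (first components of the) entries with matching key
theorem pv_idx_getD (l : List (Int × Int)) (d : PySem.Dict Int (List Int)) (a : Int) :
    (l.foldl (fun d p => d.modify p.2 [] (· ++ [p.1])) d).getD a []
      = d.getD a [] ++ (l.filter (fun p => p.2 == a)).map (·.1) := by
  induction l generalizing d with
  | nil => simp
  | cons p l ih =>
    simp only [List.foldl_cons, ih, List.filter_cons]
    by_cases h : p.2 = a
    · simp [h]
    · simp [h, PySem.Dict.getD_modify, Ne.symm h]

-- nested fold over index lists = fold over their concatenation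
theorem pv_foldl_foldl (attrs : List Int) (g : Int → List Int) (row : List Int)
    (f : List Int → Int → List Int) :
    attrs.foldl (fun row a => (g a).foldl f row) row = (attrs.flatMap g).foldl f row := by
  induction attrs generalizing row with
  | nil => simp
  | cons a attrs ih => simp [List.foldl_append, ih]

-- setting positions to 1: length preserved and entries characterised
theorem pv_setfold_len (ps : List Int) (row : List Int)
    (h : ∀ j ∈ ps, 0 ≤ j ∧ j.toNat < row.length) :
    (ps.foldl (fun row j => PySem.List.pySetD row j 1) row).length = row.length := by
  induction ps generalizing row with
  | nil => rfl
  | cons j ps ih =>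
    have hj := h j (by simp)
    simp only [List.foldl_cons]
    rw [ih]
    · rw [PySem.List.pySetD_of_nonneg _ _ hj.1, List.length_set]
    · intro j' hj'
      have := h j' (by simp [hj'])
      rwa [PySem.List.pySetD_of_nonneg _ _ hj.1, List.length_set]

theorem pv_setfold_get (ps : List Int) (row : List Int)
    (h : ∀ j ∈ ps, 0 ≤ j ∧ j.toNat < row.length) (k : Nat) :
    (ps.foldl (fun row j => PySem.List.pySetD row j 1) row)[k]?
      = if (k : Int) ∈ ps then some 1 else row[k]? := by
  induction ps generalizing row with
  | nil => simp
  | cons j ps ih =>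
    have hj := h j (by simp)
    have hrest : ∀ j' ∈ ps, 0 ≤ j' ∧ j'.toNat < (PySem.List.pySetD row j 1).length := by
      intro j' hj'
      have := h j' (by simp [hj'])
      rwa [PySem.List.pySetD_of_nonneg _ _ hj.1, List.length_set]
    simp only [List.foldl_cons, ih _ hrest]
    rw [PySem.List.pySetD_of_nonneg _ _ hj.1]
    by_cases hk : (k : Int) ∈ ps
    · simp [hk]
    · by_cases hjk : j = (k : Int)
      · have hjt : j.toNat = k := by omega
        simp [hk, hjk, hjt ▸ hj.2]
      · have hkj : ¬((k : Int) = j) := fun h => hjk h.symm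
        have : j.toNat ≠ k := by omega
        simp [hk, hkj, this]

-- membership in the positions list of attribute a
theorem pv_mem_positions (A_set : List Int) (a : Int) (k : Nat) :
    ((k : Int) ∈ ((PySem.List.enumerate A_set 0).filter (fun p => p.2 == a)).map (·.1))
      ↔ (∃ (h : k < A_set.length), A_set[k] = a) := by
  constructor
  · rintro hm
    simp only [List.mem_map, List.mem_filter] at hm
    obtain ⟨p, ⟨hpe, hpa⟩, hp1⟩ := hm
    rw [PySem.List.mem_enumerate_iff] at hpe
    obtain ⟨m, hm, rfl⟩ := hpe
    simp only at hp1 hpa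
    have : m = k := by omega
    subst this
    exact ⟨hm, by simpa using hpa⟩
  · rintro ⟨h, ha⟩
    simp only [List.mem_map, List.mem_filter]
    refine ⟨((k : Int), A_set[k]), ⟨?_, by simpa using ha⟩, by simp⟩
    rw [PySem.List.mem_enumerate_iff]
    exact ⟨k, h, by simp⟩

-- every index entry is a valid position
theorem pv_positions_range (A_set : List Int) (a : Int) (j : Int)
    (hj : j ∈ (pvIndex A_set).getD a []) : 0 ≤ j ∧ j.toNat < A_set.length := by
  unfold pvIndex at hj
  rw [pv_idx_getD] at hj
  simp only [PySem.Dict.getD_empty, List.nil_append, List.mem_map, List.mem_filter] at hj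
  obtain ⟨p, ⟨hpe, _⟩, rfl⟩ := hj
  rw [PySem.List.mem_enumerate_iff] at hpe
  obtain ⟨m, hm, rfl⟩ := hpe
  refine ⟨by simp, ?_⟩
  simp
  omega

-- B's per-item vector equals A's per-item vector
theorem pv_vector_eq (ia : PySem.Dict Int (List Int)) (A_set : List Int) (item_id : Int) :
    pvVectorFor ia (pvIndex A_set) A_set.length item_id
      = A_set.map (fun attr => if (ia.getD item_id []).contains attr then (1 : Int) else 0) := by
  set attrs := ia.getD item_id [] with hattrs
  unfold pvVectorFor
  rw [pv_foldl_foldl]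
  set ps := attrs.flatMap (fun a => (pvIndex A_set).getD a []) with hps
  have hrange : ∀ j ∈ ps, 0 ≤ j ∧ j.toNat < (List.replicate A_set.length (0 : Int)).length := by
    intro j hj
    rw [hps, List.mem_flatMap] at hj
    obtain ⟨a, _, hja⟩ := hj
    simpa using pv_positions_range A_set a j hja
  have hmem : ∀ (k : Nat) (hk : k < A_set.length),
      (((k : Int) ∈ ps) ↔ A_set[k]'hk ∈ attrs) := by
    intro k hk
    rw [hps, List.mem_flatMap]
    constructor
    · rintro ⟨a, ha, hka⟩
      have := pv_mem_positions A_set a k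
      unfold pvIndex at hka
      rw [pv_idx_getD] at hka
      simp only [PySem.Dict.getD_empty, List.nil_append] at hka
      obtain ⟨_, rfl⟩ := this.mp hka
      exact ha
    · intro hAk
      refine ⟨A_set[k], hAk, ?_⟩
      unfold pvIndex
      rw [pv_idx_getD]
      simp only [PySem.Dict.getD_empty, List.nil_append]
      exact (pv_mem_positions A_set _ k).mpr ⟨hk, rfl⟩
  apply List.ext_getElem?
  intro k
  by_cases hk : k < A_set.length
  · rw [pv_setfold_get ps _ hrange k]
    rw [List.getElem?_map]
    have h0 : (List.replicate A_set.length (0 : Int))[k]? = some 0 := by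
      simp [hk]
    rw [h0, List.getElem?_eq_getElem hk]
    simp only [Option.map_some]
    by_cases hm : A_set[k] ∈ attrs
    · simp [(hmem k hk).mpr hm, hm]
    · have : ¬ ((k : Int) ∈ ps) := fun h => hm ((hmem k hk).mp h)
      simp [this, hm]
  · have h1 : (ps.foldl (fun row j => PySem.List.pySetD row j 1) (List.replicate A_set.length (0 : Int))).length = A_set.length := by
      rw [pv_setfold_len ps _ hrange, List.length_replicate]
    rw [List.getElem?_eq_none (by rw [h1]; omega),
        List.getElem?_eq_none (by rw [List.length_map]; omega)]

-- ===== VERDICT (by name: the statement is the Claim_ definition above) =====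
theorem item_attribute_generation_matrix_spec : Claim_equal_item_attribute_generation_matrix := by
  intro i_old i_new item_attributes A_set _
  unfold Spec_item_attribute_generation_matrix
  unfold item_attribute_generation_matrix item_attribute_generation_matrix_alt
  simp only [pv_vector_eq]
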